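-- pv_equiv track=rewrite | github.com/addaix/raglab | misc/segmentation_lib.py | sentence_splits_ids
-- ===== SOURCE A (Python) =====
-- def sentence_splits_ids(text, sep=[".", "!", "?"]):
--     indices = []
--     start = 0
--     for i, char in enumerate(text):
--         if char in sep:
--             indices.append((start, i + 1))
--             start = i + 1
--     if start < len(text):
--         indices.append((start, len(text)))
--     return indices
-- ===== SOURCE B (Python) =====
-- def sentence_splits_ids(text, sep=[".", "!", "?"]):
--     bounds = [0] + [i + 1 for i, c in enumerate(text) if c in sep]
--     spans = [(bounds[k], bounds[k + 1]) for k in range(len(bounds) - 1)]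
--     if bounds[-1] < len(text):
--         spans.append((bounds[-1], len(text)))
--     return spans
-- ===== Notes on version B (the rewrite author's own statement) =====
-- stated objective: alternative
-- what changed: Instead of one stateful loop carrying a running start index, B first collects a boundary list in one comprehension and then pairs consecutive boundaries to form the spans, guarding the trailing span with the last boundary.
import Mathlib
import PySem

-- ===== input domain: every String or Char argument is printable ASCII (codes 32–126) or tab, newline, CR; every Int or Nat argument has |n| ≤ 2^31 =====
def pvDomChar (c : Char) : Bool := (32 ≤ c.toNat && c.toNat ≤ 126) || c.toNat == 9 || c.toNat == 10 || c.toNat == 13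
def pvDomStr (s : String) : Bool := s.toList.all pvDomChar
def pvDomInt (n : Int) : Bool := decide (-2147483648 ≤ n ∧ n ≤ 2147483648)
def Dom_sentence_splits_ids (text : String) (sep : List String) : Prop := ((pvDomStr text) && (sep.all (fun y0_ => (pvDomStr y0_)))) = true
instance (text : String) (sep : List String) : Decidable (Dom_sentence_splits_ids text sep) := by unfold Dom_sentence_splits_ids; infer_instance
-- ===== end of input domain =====

-- B collects a boundary table first, then pairs consecutive boundaries; same result, different decomposition.

-- ===== PORT A =====
def sentence_splits_ids (text : String) (sep : List String) : List (Int × Int) :=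
  let st := (PySem.List.enumerate text.toList 0).foldl
    (fun (acc : List (Int × Int) × Int) x =>
      if sep.contains (String.mk [x.2]) then (acc.1 ++ [(acc.2, x.1 + 1)], x.1 + 1) else acc)
    ([], 0)
  if st.2 < PySem.Str.len text then st.1 ++ [(st.2, PySem.Str.len text)] else st.1

-- ===== PORT B =====
def sentence_splits_ids_alt (text : String) (sep : List String) : List (Int × Int) :=
  let bounds : List Int := 0 :: (PySem.List.enumerate text.toList 0).filterMap
      (fun x => if sep.contains (String.mk [x.2]) then some (x.1 + 1) else none)
  let spans := (List.range (bounds.length - 1)).map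
      (fun k => (bounds.getD k 0, bounds.getD (k + 1) 0))
  if bounds.getLastD 0 < PySem.Str.len text then spans ++ [(bounds.getLastD 0, PySem.Str.len text)] else spans

-- ===== PRECONDITION & SPEC =====
def Spec_sentence_splits_ids (text : String) (sep : List String) (out : List (Int × Int)) : Prop := out = sentence_splits_ids_alt text sep
instance (text : String) (sep : List String) (out : List (Int × Int)) : Decidable (Spec_sentence_splits_ids text sep out) := by unfold Spec_sentence_splits_ids; infer_instance

-- ===== CLAIM (what is proved, stated in full; the proofs are below) =====
def Claim_equal_sentence_splits_ids : Prop := ∀ (text : String) (sep : List String), Dom_sentence_splits_ids text sep → Spec_sentence_splits_ids text sep (sentence_splits_ids text sep)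

-- ===== LEMMAS AND PROOFS =====

/-- Pair a start boundary with the successive boundaries of a list. -/
def pvPairs : Int → List Int → List (Int × Int)
  | _, [] => []
  | s, b :: t => (s, b) :: pvPairs b t

/-- A's fold over any list of (index, char) pairs produces exactly the consecutive
    pairs of the collected boundaries, and its final `start` is the last boundary. -/
theorem foldA_eq (p : Int × Char → Bool) (l : List (Int × Char)) (acc : List (Int × Int)) (s : Int) :
    l.foldl (fun (acc : List (Int × Int) × Int) x =>
        if p x then (acc.1 ++ [(acc.2, x.1 + 1)], x.1 + 1) else acc) (acc, s)
      = (acc ++ pvPairs s (l.filterMap (fun x => if p x then some (x.1 + 1) else none)),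
         (s :: l.filterMap (fun x => if p x then some (x.1 + 1) else none)).getLastD 0) := by
  induction l generalizing acc s with
  | nil => simp [pvPairs]
  | cons x t ih =>
    by_cases h : p x = true
    · simp [List.foldl_cons, h, ih, pvPairs]
    · simp [List.foldl_cons, h, ih]

/-- B's range/index pairing of the boundary list computes `pvPairs`. -/
theorem range_pairs_eq (s : Int) (bs : List Int) :
    (List.range ((s :: bs).length - 1)).map
        (fun k => ((s :: bs).getD k 0, (s :: bs).getD (k + 1) 0)) = pvPairs s bs := by
  induction bs generalizing s with
  | nil => simp [pvPairs]
  | cons b t ih =>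
    simp only [List.length_cons, Nat.add_sub_cancel] at *
    rw [List.range_succ_eq_map]
    simp only [List.map_cons, List.map_map, pvPairs]
    refine congrArg₂ _ rfl ?_
    rw [← ih b]
    rfl

-- ===== VERDICT (by name: the statement is the Claim_ definition above) =====
theorem sentence_splits_ids_spec : Claim_equal_sentence_splits_ids := by
  intro text sep _
  show sentence_splits_ids text sep = sentence_splits_ids_alt text sep
  simp only [sentence_splits_ids, sentence_splits_ids_alt, foldA_eq, range_pairs_eq,
    List.nil_append]
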